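-- pv_equiv track=rewrite | github.com/gosch/Katas-in-python | 2019/september/codesignal/neighboringCells.py | neighboringCells
-- ===== SOURCE A (Python) =====
-- def neighboringCells(matrix):
--     r1 = 0
--     if len(matrix) == 1 and len(matrix[0]) == 1:
--         return 0
--     elif len(matrix) == 1:
--         r1 = 1
--     elif len(matrix[0]) == 1:
--         r1 = 1
--
--     for i in range(len(matrix)):
--         for j in range(len(matrix[i])):
--             col = 1 if 0 < i < len(matrix) - 1 else 0
--             row = 1 if 0 < j < len(matrix[i]) - 1 else 0
--             matrix[i][j] = 2 + col + row - r1
--     return matrix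
-- ===== SOURCE B (Python) =====
-- def neighboringCells(matrix):
--     r = len(matrix)
--     if r == 1 and len(matrix[0]) == 1:
--         return 0
--     r1 = r == 1 or len(matrix[0]) == 1
--     for i, row in enumerate(matrix):
--         c = len(row)
--         e = 2 + (0 < i < r - 1) - r1
--         row[:] = [e] + [e + 1] * (c - 2) + [e] if c >= 2 else [e] * c
--     return matrix
-- ===== Notes on version B (the rewrite author's own statement) =====
-- stated objective: faster
-- what changed: B computes each row's border value once and builds the row in a single splice (two border cells around a C-level replicated interior block), eliminating A's per-cell inner loop with its two conditional tests per cell.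
-- outside the precondition, e.g. on neighboringCells([[5]]): A returns 0, B returns 0; on neighboringCells([]): A raises IndexError, B raises IndexError
import Mathlib
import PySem

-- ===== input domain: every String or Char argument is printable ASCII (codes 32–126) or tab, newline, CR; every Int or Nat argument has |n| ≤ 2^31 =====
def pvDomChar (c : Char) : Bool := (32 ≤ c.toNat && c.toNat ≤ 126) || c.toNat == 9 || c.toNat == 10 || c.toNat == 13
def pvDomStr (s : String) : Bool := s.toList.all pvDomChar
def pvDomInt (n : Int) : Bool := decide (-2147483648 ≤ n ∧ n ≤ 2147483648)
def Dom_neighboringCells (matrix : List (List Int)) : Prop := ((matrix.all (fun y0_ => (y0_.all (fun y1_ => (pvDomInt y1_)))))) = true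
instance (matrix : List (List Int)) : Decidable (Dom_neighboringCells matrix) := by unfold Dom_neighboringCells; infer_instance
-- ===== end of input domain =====

-- B computes the border value once per row and builds the row in one splice (two border
-- cells around a replicated interior block) instead of A's per-cell nested loops; both
-- Pythons mutate the argument in place, and the equivalence proved is about the RETURN value.

-- ===== PORT A =====
def neighboringCells (matrix : List (List Int)) : List (List Int) :=
  if matrix.length = 1 ∧ (matrix.getD 0 []).length = 1 then
    []  -- Python returns the int 0 here (not a matrix value); excluded by Pre_
  else if matrix.length = 0 then
    []  -- Python raises IndexError on len(matrix[0]); excluded by Pre_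
  else
    let r1 : Int := if matrix.length = 1 then 1 else if (matrix.getD 0 []).length = 1 then 1 else 0
    (List.range matrix.length).foldl
      (fun mat i =>
        mat.set i ((List.range (mat.getD i []).length).foldl
          (fun row j =>
            let col : Int := if 0 < i ∧ i < mat.length - 1 then 1 else 0
            let rw : Int := if 0 < j ∧ j < (mat.getD i []).length - 1 then 1 else 0
            row.set j (2 + col + rw - r1))
          (mat.getD i [])))
      matrix

-- ===== PORT B =====
def neighboringCells_alt (matrix : List (List Int)) : List (List Int) :=
  let r := matrix.length
  if r = 1 ∧ (matrix.getD 0 []).length = 1 then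
    []  -- Python returns the int 0 here (not a matrix value); excluded by Pre_
  else if r = 0 then
    []  -- Python raises IndexError on len(matrix[0]); excluded by Pre_
  else
    let r1 : Int := if r = 1 ∨ (matrix.getD 0 []).length = 1 then 1 else 0
    matrix.mapIdx (fun i row =>
      let c := row.length
      let e : Int := 2 + (if 0 < i ∧ i < r - 1 then 1 else 0) - r1
      if 2 ≤ c then e :: List.replicate (c - 2) (e + 1) ++ [e]
      else List.replicate c e)

-- ===== PRECONDITION & SPEC =====
-- Pre_ excludes only the inputs on which A does not return a matrix: the empty matrix
-- (A raises IndexError on matrix[0]) and the 1×1 matrix (A returns the scalar int 0,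
-- which is not a value of the declared list-of-lists return type).
def Pre_neighboringCells (matrix : List (List Int)) : Prop :=
  matrix ≠ [] ∧ ¬(matrix.length = 1 ∧ (matrix.getD 0 []).length = 1)
instance (matrix : List (List Int)) : Decidable (Pre_neighboringCells matrix) := by
  unfold Pre_neighboringCells; infer_instance

def pvWitness_neighboringCells : List (List Int) := [[1, 2], [3, 4]]

def Spec_neighboringCells (matrix : List (List Int)) (out : List (List Int)) : Prop := out = neighboringCells_alt matrix
instance (matrix : List (List Int)) (out : List (List Int)) : Decidable (Spec_neighboringCells matrix out) := by unfold Spec_neighboringCells; infer_instance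

-- ===== CLAIM (what is proved, stated in full; the proofs are below) =====
def Claim_equal_neighboringCells : Prop := ∀ (matrix : List (List Int)), Dom_neighboringCells matrix → Pre_neighboringCells matrix → Spec_neighboringCells matrix (neighboringCells matrix)

-- ===== LEMMAS AND PROOFS =====

-- A's cell formula, as a function of the matrix dimensions and the cell position.
def pvGA (R C : Nat) (r1 : Int) (i j : Nat) : Int :=
  2 + (if 0 < i ∧ i < R - 1 then 1 else 0) + (if 0 < j ∧ j < C - 1 then 1 else 0) - r1

-- Filling every position 0..n-1 of a list by set is a map over range plus the untouched tail.
theorem pv_foldl_set_range {α : Type} (g : Nat → α) :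
    ∀ (n : Nat) (L : List α), n ≤ L.length →
      (List.range n).foldl (fun r j => r.set j (g j)) L =
        (List.range n).map g ++ L.drop n := by
  intro n
  induction n with
  | zero => intro L _; simp
  | succ n ih =>
    intro L hn
    have hlt : n < L.length := hn
    rw [List.range_succ, List.foldl_append, ih L (Nat.le_of_lt hlt)]
    simp only [List.foldl_cons, List.foldl_nil]
    rw [List.set_append]
    simp only [List.length_map, List.length_range, Nat.lt_irrefl, if_false, Nat.sub_self]
    rw [List.drop_eq_getElem_cons hlt, List.set_cons_zero]
    simp

theorem pv_foldl_set_all {α : Type} (g : Nat → α) (L : List α) :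
    (List.range L.length).foldl (fun r j => r.set j (g j)) L =
      (List.range L.length).map g := by
  simpa using pv_foldl_set_range g L.length L le_rfl

-- Invariant of A's outer loop: after n iterations the first n rows are rewritten by the
-- formula, the rest are untouched.
theorem pv_A_loop (M : List (List Int)) (r1 : Int) :
    ∀ (n : Nat), n ≤ M.length →
      (List.range n).foldl
        (fun mat i =>
          mat.set i ((List.range (mat.getD i []).length).foldl
            (fun row j =>
              let col : Int := if 0 < i ∧ i < mat.length - 1 then 1 else 0
              let rw : Int := if 0 < j ∧ j < (mat.getD i []).length - 1 then 1 else 0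
              row.set j (2 + col + rw - r1))
            (mat.getD i [])))
        M
      = (M.take n).mapIdx
          (fun i row => (List.range row.length).map (pvGA M.length row.length r1 i))
        ++ M.drop n := by
  intro n
  induction n with
  | zero => intro _; simp
  | succ n ih =>
    intro hn
    have hlt : n < M.length := hn
    rw [List.range_succ, List.foldl_append, ih (Nat.le_of_lt hlt)]
    simp only [List.foldl_cons, List.foldl_nil]
    set mat := (M.take n).mapIdx
        (fun i row => (List.range row.length).map (pvGA M.length row.length r1 i))
      ++ M.drop n with hmat
    have hpre : ((M.take n).mapIdx
        (fun i row => (List.range row.length).map (pvGA M.length row.length r1 i))).length = n := by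
      simp [Nat.le_of_lt hlt]
    have hlen : mat.length = M.length := by
      rw [hmat]; simp [hpre]; omega
    have hget : mat.getD n [] = M[n] := by
      rw [hmat]
      rw [List.getD, List.getElem?_append_right (by omega)]
      rw [hpre, Nat.sub_self, List.getElem?_drop]
      simp [hlt]
    rw [hget, hlen]
    rw [show (fun (row : List Int) (j : Nat) =>
          let col : Int := if 0 < n ∧ n < M.length - 1 then 1 else 0
          let rw : Int := if 0 < j ∧ j < M[n].length - 1 then 1 else 0
          row.set j (2 + col + rw - r1))
        = (fun (row : List Int) (j : Nat) => row.set j (pvGA M.length M[n].length r1 n j)) from rfl]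
    rw [pv_foldl_set_all (pvGA M.length M[n].length r1 n) M[n]]
    rw [hmat, List.drop_eq_getElem_cons hlt, List.set_append]
    rw [hpre]
    simp only [Nat.lt_irrefl, if_false, Nat.sub_self, List.set_cons_zero]
    rw [show M.take (n + 1) = M.take n ++ [M[n]] from by
      rw [List.take_add_one, List.getElem?_eq_getElem hlt]; rfl]
    rw [List.mapIdx_concat]
    simp [Nat.min_eq_left (Nat.le_of_lt hlt)]

-- The per-cell map over a row equals B's spliced row (border, replicated interior, border).
theorem pv_row (c : Nat) (e : Int) :
    (List.range c).map (fun j => e + (if 0 < j ∧ j < c - 1 then (1:Int) else 0)) =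
      (if 2 ≤ c then e :: List.replicate (c - 2) (e + 1) ++ [e]
       else List.replicate c e) := by
  rcases Nat.lt_or_ge c 2 with hc | hc
  · interval_cases c <;> simp
  · obtain ⟨m, rfl⟩ : ∃ m, c = m + 2 := ⟨c - 2, by omega⟩
    rw [if_pos hc]
    apply List.ext_getElem
    · simp
    · intro j hj hj'
      simp only [List.getElem_map, List.getElem_range]
      rcases j with _ | j
      · simp
      · have hj2 : j < m + 1 := by
          simp only [List.length_append, List.length_cons, List.length_replicate, List.length_nil] at hj'
          omega
        by_cases hjm : j < m
        · rw [List.getElem_append_left (by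
            simp only [List.length_cons, List.length_replicate]; omega)]
          rw [List.getElem_cons_succ, List.getElem_replicate]
          split_ifs <;> omega
        · have hje : j = m := by omega
          subst hje
          rw [List.getElem_append_right (by
            simp only [List.length_cons, List.length_replicate]; omega)]
          simp only [List.length_cons, List.length_replicate, List.getElem_singleton]
          split_ifs <;> omega

theorem pv_A_eq (matrix : List (List Int)) (h : Pre_neighboringCells matrix) :
    neighboringCells matrix = neighboringCells_alt matrix := by
  obtain ⟨hne, h11⟩ := h
  obtain ⟨m0, rest, rfl⟩ : ∃ m0 rest, matrix = m0 :: rest := by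
    cases matrix with
    | nil => exact absurd rfl hne
    | cons a l => exact ⟨a, l, rfl⟩
  have hne0 : ¬((m0 :: rest).length = 0) := by simp
  unfold neighboringCells neighboringCells_alt
  simp only [if_neg h11, if_neg hne0]
  rw [pv_A_loop (m0 :: rest)
      (if (m0 :: rest).length = 1 then (1:Int)
        else if ((m0 :: rest).getD 0 []).length = 1 then 1 else 0)
      (m0 :: rest).length le_rfl]
  simp only [List.take_length, List.drop_length, List.append_nil]
  have hr1 : (if (m0 :: rest).length = 1 then (1:Int)
        else if ((m0 :: rest).getD 0 []).length = 1 then 1 else 0)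
      = (if (m0 :: rest).length = 1 ∨ ((m0 :: rest).getD 0 []).length = 1 then 1 else 0) := by
    by_cases h1 : rest = [] <;> by_cases h2 : m0.length = 1 <;> simp [h1, h2]
  rw [hr1]
  apply List.ext_getElem
  · simp
  · intro i hi hi'
    simp only [List.length_mapIdx] at hi hi'
    rw [List.getElem_mapIdx, List.getElem_mapIdx]
    have hfun : (List.range (m0 :: rest)[i].length).map
          (pvGA (m0 :: rest).length (m0 :: rest)[i].length
            (if (m0 :: rest).length = 1 ∨ ((m0 :: rest).getD 0 []).length = 1 then 1 else 0) i)
        = (List.range (m0 :: rest)[i].length).map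
            (fun j => (2 + (if 0 < i ∧ i < (m0 :: rest).length - 1 then (1:Int) else 0)
                - (if (m0 :: rest).length = 1 ∨ ((m0 :: rest).getD 0 []).length = 1 then 1 else 0))
              + (if 0 < j ∧ j < (m0 :: rest)[i].length - 1 then (1:Int) else 0)) := by
      apply List.map_congr_left
      intro j _
      unfold pvGA
      split_ifs <;> omega
    rw [hfun, pv_row]

-- ===== VERDICT (by name: the statement is the Claim_ definition above) =====
theorem neighboringCells_spec : Claim_equal_neighboringCells := by
  intro matrix _ hpre
  show neighboringCells matrix = neighboringCells_alt matrix
  exact pv_A_eq matrix hpre
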